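-- pv_equiv track=rewrite | github.com/FishOfPitt116/AdventOfCode | 2025/day4/printing_department.py | _get_accessible_rolls
-- ===== SOURCE A (Python) =====
-- def _get_accessible_rolls(roll_lines: list[list[int]]):
--     accessible_rolls = []
--
--     for i in range(len(roll_lines)):
--         for j in range(len(roll_lines[0])):
--             if roll_lines[i][j] == 1:
--                 num_adjacent_rolls = 0
--                 if i > 0:
--                     if j > 0:
--                         num_adjacent_rolls += roll_lines[i-1][j-1]
--                     num_adjacent_rolls += roll_lines[i-1][j]
--                     if j < len(roll_lines[0])-1:
--                         num_adjacent_rolls += roll_lines[i-1][j+1]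
--                 if j > 0:
--                     num_adjacent_rolls += roll_lines[i][j-1]
--                 if j < len(roll_lines[0])-1:
--                     num_adjacent_rolls += roll_lines[i][j+1]
--                 if i < len(roll_lines)-1:
--                     if j > 0:
--                         num_adjacent_rolls += roll_lines[i+1][j-1]
--                     num_adjacent_rolls += roll_lines[i+1][j]
--                     if j < len(roll_lines[0])-1:
--                         num_adjacent_rolls += roll_lines[i+1][j+1]
--                 if num_adjacent_rolls < 4:
--                     accessible_rolls.append([i, j])
--
--     return accessible_rolls
-- ===== SOURCE B (Python) =====
-- def _get_accessible_rolls(roll_lines: list[list[int]]):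
--     # Separable two-pass box filter: one vertical pass builds column sums,
--     # then each cell needs only 3 horizontal lookups minus the center.
--     rows = len(roll_lines)
--     w = len(roll_lines[0]) if rows else 0
--
--     vert = []
--     for i in range(rows):
--         row = []
--         for j in range(w):
--             s = roll_lines[i][j]
--             if i > 0:
--                 s += roll_lines[i - 1][j]
--             if i + 1 < rows:
--                 s += roll_lines[i + 1][j]
--             row.append(s)
--         vert.append(row)
--
--     out = []
--     for i in range(rows):
--         for j in range(w):
--             if roll_lines[i][j] == 1:
--                 s = vert[i][j]
--                 if j > 0:
--                     s += vert[i][j - 1]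
--                 if j + 1 < w:
--                     s += vert[i][j + 1]
--                 if s - roll_lines[i][j] < 4:
--                     out.append([i, j])
--     return out
-- ===== Notes on version B (the rewrite author's own statement) =====
-- stated objective: alternative
-- what changed: Replaces the per-cell 8-neighbour scan with per-direction branch guards by a separable two-pass box filter: one vertical pass precomputes a column-sum table, then each cell reads just 3 horizontal entries of that table and subtracts the centre.
import Mathlib
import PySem

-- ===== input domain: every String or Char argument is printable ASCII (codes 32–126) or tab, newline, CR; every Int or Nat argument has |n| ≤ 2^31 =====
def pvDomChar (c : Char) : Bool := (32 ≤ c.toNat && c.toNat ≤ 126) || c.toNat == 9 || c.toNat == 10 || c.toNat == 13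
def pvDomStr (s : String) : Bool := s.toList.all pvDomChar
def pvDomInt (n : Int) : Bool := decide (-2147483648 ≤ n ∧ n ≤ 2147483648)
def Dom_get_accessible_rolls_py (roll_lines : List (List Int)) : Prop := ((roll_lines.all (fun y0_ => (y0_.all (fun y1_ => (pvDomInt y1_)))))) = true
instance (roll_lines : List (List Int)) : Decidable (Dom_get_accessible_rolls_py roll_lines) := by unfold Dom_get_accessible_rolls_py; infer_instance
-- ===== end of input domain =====

-- B replaces the per-cell 8-neighbour branchy scan by a separable two-pass box filter
-- (a vertical column-sum table, then three horizontal lookups minus the centre); same cost class, plainer per-cell work.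
-- Equivalence is over the return value; neither version mutates its argument.

-- grid indexing g[i][j]; exact under Pre_ (every access made by either program is in range there)
def pvCell (g : List (List Int)) (i j : Nat) : Int := (g.getD i []).getD j 0

-- ===== PORT A =====
-- A's num_adjacent_rolls for cell (i,j): same guards, same order
def pvNbA (g : List (List Int)) (rows w i j : Nat) : Int :=
  (if i > 0 then
     (if j > 0 then pvCell g (i-1) (j-1) else 0)
     + pvCell g (i-1) j
     + (if j < w - 1 then pvCell g (i-1) (j+1) else 0)
   else 0)
  + (if j > 0 then pvCell g i (j-1) else 0)
  + (if j < w - 1 then pvCell g i (j+1) else 0)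
  + (if i < rows - 1 then
       (if j > 0 then pvCell g (i+1) (j-1) else 0)
       + pvCell g (i+1) j
       + (if j < w - 1 then pvCell g (i+1) (j+1) else 0)
     else 0)

def get_accessible_rolls_py (roll_lines : List (List Int)) : List (List Int) :=
  let rows := roll_lines.length
  let w := (roll_lines.headD []).length
  (List.range rows).foldl (fun acc i =>
    (List.range w).foldl (fun acc j =>
      if pvCell roll_lines i j = 1 then
        if pvNbA roll_lines rows w i j < 4 then acc ++ [[(i : Int), (j : Int)]] else acc
      else acc) acc) []

-- ===== PORT B =====
-- vertical pass cell: column j summed over rows i-1..i+1 (clamped)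
def pvVCell (g : List (List Int)) (rows i j : Nat) : Int :=
  pvCell g i j
  + (if i > 0 then pvCell g (i-1) j else 0)
  + (if i + 1 < rows then pvCell g (i+1) j else 0)

-- horizontal pass: three lookups into the vertical table (clamped)
def pvHSum (v : List (List Int)) (w i j : Nat) : Int :=
  pvCell v i j
  + (if j > 0 then pvCell v i (j-1) else 0)
  + (if j + 1 < w then pvCell v i (j+1) else 0)

def get_accessible_rolls_py_alt (roll_lines : List (List Int)) : List (List Int) :=
  let rows := roll_lines.length
  let w := if rows = 0 then 0 else (roll_lines.headD []).length
  let vert := (List.range rows).map (fun i => (List.range w).map (fun j => pvVCell roll_lines rows i j))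
  (List.range rows).foldl (fun acc i =>
    (List.range w).foldl (fun acc j =>
      if pvCell roll_lines i j = 1 then
        if pvHSum vert w i j - pvCell roll_lines i j < 4 then acc ++ [[(i : Int), (j : Int)]] else acc
      else acc) acc) []

-- ===== PRECONDITION & SPEC =====
-- Pre_ excludes exactly the inputs where Python A raises IndexError: a row shorter than the first row.
def Pre_get_accessible_rolls_py (roll_lines : List (List Int)) : Prop :=
  ∀ row ∈ roll_lines, (roll_lines.headD []).length ≤ row.length
instance (roll_lines : List (List Int)) : Decidable (Pre_get_accessible_rolls_py roll_lines) := by unfold Pre_get_accessible_rolls_py; infer_instance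

def pvWitness_get_accessible_rolls_py : List (List Int) := [[1, 0, 1], [0, 1, 1], [1, 1, 0]]

def Spec_get_accessible_rolls_py (roll_lines : List (List Int)) (out : List (List Int)) : Prop := out = get_accessible_rolls_py_alt roll_lines
instance (roll_lines : List (List Int)) (out : List (List Int)) : Decidable (Spec_get_accessible_rolls_py roll_lines out) := by unfold Spec_get_accessible_rolls_py; infer_instance

-- ===== CLAIM (what is proved, stated in full; the proofs are below) =====
def Claim_equal_get_accessible_rolls_py : Prop := ∀ (roll_lines : List (List Int)), Dom_get_accessible_rolls_py roll_lines → Pre_get_accessible_rolls_py roll_lines → Spec_get_accessible_rolls_py roll_lines (get_accessible_rolls_py roll_lines)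

-- ===== LEMMAS AND PROOFS =====

theorem pv_getD_map_range {α : Type} (f : Nat → α) (n i : Nat) (d : α) (h : i < n) :
    ((List.range n).map f).getD i d = f i := by
  simp [List.getD_eq_getElem?_getD, h]

theorem pv_vert_cell (g : List (List Int)) (rows w i j : Nat) (hi : i < rows) (hj : j < w) :
    pvCell ((List.range rows).map (fun i => (List.range w).map (fun j => pvVCell g rows i j))) i j
      = pvVCell g rows i j := by
  unfold pvCell
  rw [pv_getD_map_range _ _ _ _ hi, pv_getD_map_range _ _ _ _ hj]

-- pointwise: A's branchy neighbour count equals B's (block sum − centre)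
theorem pv_count_eq (g : List (List Int)) (rows w i j : Nat) (hi : i < rows) (hj : j < w) :
    pvNbA g rows w i j =
      pvHSum ((List.range rows).map (fun i => (List.range w).map (fun j => pvVCell g rows i j))) w i j
        - pvCell g i j := by
  unfold pvHSum
  rw [pv_vert_cell g rows w i j hi hj]
  by_cases h0 : j > 0
  · rw [if_pos h0, pv_vert_cell g rows w i (j-1) hi (by omega)]
    by_cases h1 : j + 1 < w
    · rw [if_pos h1, pv_vert_cell g rows w i (j+1) hi h1]
      unfold pvNbA pvVCell
      split_ifs <;> omega
    · rw [if_neg h1]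
      unfold pvNbA pvVCell
      split_ifs <;> omega
  · rw [if_neg h0]
    by_cases h1 : j + 1 < w
    · rw [if_pos h1, pv_vert_cell g rows w i (j+1) hi h1]
      unfold pvNbA pvVCell
      split_ifs <;> omega
    · rw [if_neg h1]
      unfold pvNbA pvVCell
      split_ifs <;> omega

-- ===== VERDICT (by name: the statement is the Claim_ definition above) =====
theorem get_accessible_rolls_py_spec : Claim_equal_get_accessible_rolls_py := by
  intro g _ _
  unfold Spec_get_accessible_rolls_py get_accessible_rolls_py get_accessible_rolls_py_alt
  simp only []
  rcases eq_or_ne g.length 0 with h | h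
  · simp [h]
  · rw [if_neg h]
    apply PySem.List.foldl_congr_mem
    intro acc i hi
    apply PySem.List.foldl_congr_mem
    intro acc j hj
    rw [pv_count_eq g g.length (g.headD []).length i j (List.mem_range.mp hi) (List.mem_range.mp hj)]
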